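-- pv_equiv track=rewrite | github.com/faizananwar9-boop/News | intel-feed/core/validator.py | diagnose_issues
-- ===== SOURCE A (Python) =====
-- from typing import List, Tuple, Dict
--
-- def diagnose_issues(output: str, issues: List[str]) -> Dict[str, str]:
--     """Diagnose root cause of validation failures."""
--     diagnosis = {
--         'prompt_needs_stricter_format': False,
--         'prompt_needs_examples': False,
--         'needs_item_limit': False,
--         'needs_post_processing': False,
--         'temperature_too_high': False
--     }
--
--     for issue in issues:
--         if 'Expected exactly 5 items' in issue:
--             diagnosis['needs_item_limit'] = True
--         if 'Incorrect format' in issue: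
--             diagnosis['prompt_needs_stricter_format'] = True
--         if 'extra text' in issue:
--             diagnosis['needs_post_processing'] = True
--
--     return diagnosis
-- ===== SOURCE B (Python) =====
-- from typing import List, Dict
--
-- def diagnose_issues(output: str, issues: List[str]) -> Dict[str, str]:
--     """Diagnose root cause of validation failures (per-flag scans instead of one accumulating pass)."""
--     return {
--         'prompt_needs_stricter_format': any('Incorrect format' in issue for issue in issues),
--         'prompt_needs_examples': False,
--         'needs_item_limit': any('Expected exactly 5 items' in issue for issue in issues),
--         'needs_post_processing': any('extra text' in issue for issue in issues),
--         'temperature_too_high': False,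
--     }
-- ===== Notes on version B (the rewrite author's own statement) =====
-- stated objective: simpler
-- what changed: Replaces the mutated-dict single accumulating loop with a dict literal in which each flag is an independent any() scan of the issues list.
import Mathlib
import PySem

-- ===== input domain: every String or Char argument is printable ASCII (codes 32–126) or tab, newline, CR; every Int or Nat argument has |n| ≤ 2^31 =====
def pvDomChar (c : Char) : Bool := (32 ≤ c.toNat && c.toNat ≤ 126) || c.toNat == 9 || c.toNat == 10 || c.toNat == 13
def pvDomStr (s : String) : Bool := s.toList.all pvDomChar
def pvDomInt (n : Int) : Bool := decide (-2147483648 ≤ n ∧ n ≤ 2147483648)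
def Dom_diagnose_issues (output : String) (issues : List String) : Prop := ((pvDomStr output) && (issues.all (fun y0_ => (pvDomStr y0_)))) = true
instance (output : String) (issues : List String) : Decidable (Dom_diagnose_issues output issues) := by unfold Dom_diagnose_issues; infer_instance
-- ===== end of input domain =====

-- B replaces A's single accumulating pass over issues (mutating a flags dict) with a
-- dict literal whose three live flags are independent any() scans; same result, simpler shape.


-- ===== PORT A =====
def diagnose_issues (output : String) (issues : List String) : List (String × Bool) :=
  let diagnosis : PySem.Dict String Bool := PySem.Dict.ofList
    [("prompt_needs_stricter_format", false),
     ("prompt_needs_examples", false),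
     ("needs_item_limit", false),
     ("needs_post_processing", false),
     ("temperature_too_high", false)]
  let diagnosis := issues.foldl (fun d issue =>
    let d := if PySem.Str.isIn "Expected exactly 5 items" issue then d.insert "needs_item_limit" true else d
    let d := if PySem.Str.isIn "Incorrect format" issue then d.insert "prompt_needs_stricter_format" true else d
    if PySem.Str.isIn "extra text" issue then d.insert "needs_post_processing" true else d) diagnosis
  diagnosis.items

-- ===== PORT B =====
def diagnose_issues_alt (output : String) (issues : List String) : List (String × Bool) :=
  [("prompt_needs_stricter_format", issues.any (fun issue => PySem.Str.isIn "Incorrect format" issue)),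
   ("prompt_needs_examples", false),
   ("needs_item_limit", issues.any (fun issue => PySem.Str.isIn "Expected exactly 5 items" issue)),
   ("needs_post_processing", issues.any (fun issue => PySem.Str.isIn "extra text" issue)),
   ("temperature_too_high", false)]

-- ===== PRECONDITION & SPEC =====
def Spec_diagnose_issues (output : String) (issues : List String) (out : List (String × Bool)) : Prop := out = diagnose_issues_alt output issues
instance (output : String) (issues : List String) (out : List (String × Bool)) : Decidable (Spec_diagnose_issues output issues out) := by unfold Spec_diagnose_issues; infer_instance

-- ===== CLAIM (what is proved, stated in full; the proofs are below) =====
def Claim_equal_diagnose_issues : Prop := ∀ (output : String) (issues : List String), Dom_diagnose_issues output issues → Spec_diagnose_issues output issues (diagnose_issues output issues)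

-- ===== LEMMAS AND PROOFS =====

-- The 5-key flags dict with the three live flag values as parameters.
def mkDiag (b1 b3 b4 : Bool) : PySem.Dict String Bool :=
  PySem.Dict.mk
    [("prompt_needs_stricter_format", b1),
     ("prompt_needs_examples", false),
     ("needs_item_limit", b3),
     ("needs_post_processing", b4),
     ("temperature_too_high", false)]

theorem ins_item (b1 b3 b4 : Bool) :
    (mkDiag b1 b3 b4).insert "needs_item_limit" true = mkDiag b1 true b4 := rfl

theorem ins_fmt (b1 b3 b4 : Bool) :
    (mkDiag b1 b3 b4).insert "prompt_needs_stricter_format" true = mkDiag true b3 b4 := rfl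

theorem ins_post (b1 b3 b4 : Bool) :
    (mkDiag b1 b3 b4).insert "needs_post_processing" true = mkDiag b1 b3 true := rfl

-- Invariant of A's loop: each live flag ends up OR-ed with its any() scan.
theorem diagnose_issues_fold_inv (issues : List String) (b1 b3 b4 : Bool) :
    (issues.foldl (fun d issue =>
      let d := if PySem.Str.isIn "Expected exactly 5 items" issue then d.insert "needs_item_limit" true else d
      let d := if PySem.Str.isIn "Incorrect format" issue then d.insert "prompt_needs_stricter_format" true else d
      if PySem.Str.isIn "extra text" issue then d.insert "needs_post_processing" true else d)
      (mkDiag b1 b3 b4)) =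
    mkDiag (b1 || issues.any (fun issue => PySem.Str.isIn "Incorrect format" issue))
           (b3 || issues.any (fun issue => PySem.Str.isIn "Expected exactly 5 items" issue))
           (b4 || issues.any (fun issue => PySem.Str.isIn "extra text" issue)) := by
  induction issues generalizing b1 b3 b4 with
  | nil => simp
  | cons i rest ih =>
    simp only [List.foldl_cons, List.any_cons]
    by_cases h1 : PySem.Str.isIn "Expected exactly 5 items" i <;>
      by_cases h2 : PySem.Str.isIn "Incorrect format" i <;>
        by_cases h3 : PySem.Str.isIn "extra text" i <;>
          simp only [h1, h2, h3, Bool.false_eq_true, if_true, if_false,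
            ins_item, ins_fmt, ins_post, ih] <;>
          simp [mkDiag]

-- ===== VERDICT (by name: the statement is the Claim_ definition above) =====
theorem diagnose_issues_spec : Claim_equal_diagnose_issues := by
  intro output issues _
  unfold Spec_diagnose_issues diagnose_issues diagnose_issues_alt
  have h0 : (PySem.Dict.ofList
      [("prompt_needs_stricter_format", false),
       ("prompt_needs_examples", false),
       ("needs_item_limit", false),
       ("needs_post_processing", false),
       ("temperature_too_high", false)] : PySem.Dict String Bool) = mkDiag false false false := rfl
  simp only [h0, diagnose_issues_fold_inv]
  simp [mkDiag, PySem.Dict.items]
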